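-- pv_equiv track=rewrite | github.com/taylorcarter/bioinformatics_practice | Find_Replication_Origin.py | approx_pattern
-- ===== SOURCE A (Python) =====
-- def pattern_mismatch(genome, pattern, mismatches):
--     """
--     Counts the number of times the approximate pattern is observed in genome.
--
--     Parameters:
--         genome - str
--             whole genome nucleotide sequence. case sensitive
--         pattern - str
--             specified nucleotide sequence. case sensitive
--         mismatches - int
--             max amount of mismatches between genome and pattern allowed
--     Returns:
--         len(pattern_index) - int
--             number of times approx pattern occurs in genome
--
--     """
--     pattern_index = []
--
--     for i in range(len(genome) - (len(pattern)-1)):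
--         j = 0
--         count = 0
--         while j < len(pattern):
--             if genome[j] != pattern[j]:
--                 count += 1
--             j += 1
--
--         if count <= mismatches:
--             pattern_index.append(i)
--
--         genome = genome[1:]
--
--     return len(pattern_index)
--
-- def reverse_complement(forward_sequence):
--     """
--     Generates the reverse complement of a nucleotide sequence
--
--     Parameters:
--         forward_sequence - str
--             nucleotide sequence.
--     Returns:
--         rev_comp - str
--             the reverse complement of the input nucleotide sequence
--
--     """
--     complement = forward_sequence.replace('A', '%temp%').replace('T', 'A').replace('%temp%', 'T')
--     complement = complement.replace('G', '%temp%').replace('C', 'G').replace('%temp%', 'C')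
--
--     rev_comp = complement[::-1]
--
--     return rev_comp
--
-- def approx_pattern(genome, pattern_len, mismatches):
--     """
--     Finds most frequent pattern(s) (pattern_len long) with fewer than n number of mismatches.
--     Pattern reverse compliments are included in the count.
--
--     Parameters:
--         genome - str
--             whole genome nucleotide sequence
--         pattern_len - int
--             length of nucleotide sequence
--         mismatches - int
--             max amount of mismatches between genome and pattern allowed
--     Returns:
--         max_key_list - list of str
--              nucleotide seq n nucleotides long (pattern_len) that occur most frequently
--
--     """
--
--     counts_dict = {}
--     for i in range(len(genome) - pattern_len-1):
--         seq = genome[i:pattern_len+i]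
--
--         # counting how many times seq appears in genome, allowing n mismatches
--         forward_count = pattern_mismatch(genome, seq, mismatches)
--
--         # finding reverse compliment and counting how often it occurs, allowing n mismatches
--         reverse_comp = reverse_complement(seq)
--         reverse_count = pattern_mismatch(genome, reverse_comp, mismatches)
--
--         count = forward_count + reverse_count
--
--         if seq not in counts_dict:
--             counts_dict[seq] = count
--
--     max_key = max(counts_dict, key=counts_dict.get)
--
--     max_key_list = []
--
--     for key, value in counts_dict.items():
--         if value == counts_dict[max_key]:
--             max_key_list.append(key)
--
--     return max_key_list
-- ===== SOURCE B (Python) =====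
-- def reverse_complement(forward_sequence):
--     # the module's reverse-complement helper (same %temp% replace chain)
--     complement = forward_sequence.replace('A', '%temp%').replace('T', 'A').replace('%temp%', 'T')
--     complement = complement.replace('G', '%temp%').replace('C', 'G').replace('%temp%', 'C')
--     return complement[::-1]
--
--
-- def approx_pattern(genome, pattern_len, mismatches):
--     n = len(genome)
--     # inverted index: character -> list of its positions in genome (built once)
--     pos = {}
--     for t, c in enumerate(genome):
--         pos[c] = pos.get(c, []) + [t]
--
--     def occurrences(p):
--         # number of alignments j with Hamming(genome[j:j+len(p)], p) <= mismatches,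
--         # counted by scattering each pattern character's text occurrences onto
--         # the alignments they support, instead of comparing p to every window
--         L = len(p)
--         acc = {}
--         for i, c in enumerate(p):
--             for t in pos.get(c, []):
--                 acc[t - i] = acc.get(t - i, 0) + 1
--         return sum(1 for j in range(n - L + 1) if L - acc.get(j, 0) <= mismatches)
--
--     counts = {}
--     for i in range(n - pattern_len - 1):
--         seq = genome[i:i + pattern_len]
--         if seq not in counts:
--             counts[seq] = occurrences(seq) + occurrences(reverse_complement(seq))
--     best = max(counts.values())
--     return [k for k, v in counts.items() if v == best]
-- ===== Notes on version B (the rewrite author's own statement) =====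
-- stated objective: alternative
-- what changed: B builds an inverted index (character -> positions in genome) once and, per distinct candidate, scatters each pattern character's text positions onto an alignment-count dictionary, counting alignments with enough matches; A instead rescans the genome for every candidate and its reverse complement with pattern_mismatch, rebuilding the genome by repeated slicing (genome = genome[1:]) at every window, and recomputes for duplicate candidates.
import Mathlib
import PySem

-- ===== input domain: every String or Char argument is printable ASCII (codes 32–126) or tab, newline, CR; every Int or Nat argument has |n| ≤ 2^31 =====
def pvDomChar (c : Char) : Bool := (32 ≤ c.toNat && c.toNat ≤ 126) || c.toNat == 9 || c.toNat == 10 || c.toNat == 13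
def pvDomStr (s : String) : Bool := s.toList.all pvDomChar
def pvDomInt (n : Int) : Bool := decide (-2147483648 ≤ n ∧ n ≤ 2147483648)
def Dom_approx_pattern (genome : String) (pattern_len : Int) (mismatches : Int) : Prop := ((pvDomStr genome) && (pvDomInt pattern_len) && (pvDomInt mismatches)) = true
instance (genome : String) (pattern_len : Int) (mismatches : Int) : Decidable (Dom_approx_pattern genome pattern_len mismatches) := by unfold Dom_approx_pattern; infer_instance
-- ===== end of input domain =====

-- B replaces A's per-candidate genome rescans (pattern_mismatch re-slicing the whole
-- genome for every candidate and its reverse complement) by an inverted index built once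
-- (char -> positions) whose entries are scattered onto an alignment-count dictionary per
-- distinct candidate; the reverse-complement helper is shared (objective: alternative).

-- ===== PORT A =====

-- inner 'while j < len(pattern)' loop of pattern_mismatch (j, count are the Python locals)
def pvWhileCount (g p : List Char) (j count : Nat) : Nat :=
  if j < p.length then
    pvWhileCount g p (j + 1)
      (if PySem.List.pyGetD g (j : Int) '?' ≠ PySem.List.pyGetD p (j : Int) '?' then count + 1 else count)
  else count
termination_by p.length - j

def pattern_mismatch (genome pattern : String) (mismatches : Int) : Int :=
  let st := (PySem.List.pyRange 0 (PySem.Str.len genome - (PySem.Str.len pattern - 1)) 1).foldl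
    (fun (st : List Char × List Int) i =>
      let count := pvWhileCount st.1 pattern.toList 0 0
      let pattern_index := if (count : Int) ≤ mismatches then st.2 ++ [i] else st.2
      (PySem.List.slice st.1 (some 1) none, pattern_index))   -- genome = genome[1:]
    (genome.toList, ([] : List Int))
  (st.2.length : Int)

def reverse_complement (forward_sequence : String) : String :=
  let c1 := PySem.Str.replace (PySem.Str.replace (PySem.Str.replace forward_sequence "A" "%temp%") "T" "A") "%temp%" "T"
  let c2 := PySem.Str.replace (PySem.Str.replace (PySem.Str.replace c1 "G" "%temp%") "C" "G") "%temp%" "C"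
  (PySem.Str.slice? c2 none none (-1)).getD ""   -- complement[::-1]; step -1 never raises

def approx_pattern (genome : String) (pattern_len : Int) (mismatches : Int) : List String :=
  let counts_dict :=
    (PySem.List.pyRange 0 (PySem.Str.len genome - pattern_len - 1) 1).foldl
      (fun (counts_dict : PySem.Dict String Int) i =>
        let seq := String.ofList (PySem.List.slice genome.toList (some i) (some (pattern_len + i)))
        let forward_count := pattern_mismatch genome seq mismatches
        let reverse_comp := reverse_complement seq
        let reverse_count := pattern_mismatch genome reverse_comp mismatches
        let count := forward_count + reverse_count
        if counts_dict.contains seq then counts_dict else counts_dict.insert seq count)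
      PySem.Dict.empty
  -- max(counts_dict, key=counts_dict.get): first key attaining the maximal value
  match PySem.List.max? counts_dict.keys (fun key => counts_dict.getD key 0) with
  | none => []   -- Python: max() on an empty dict raises ValueError (outside Pre_)
  | some max_key =>
      counts_dict.items.foldl
        (fun max_key_list kv =>
          if kv.2 = counts_dict.getD max_key 0 then max_key_list ++ [kv.1] else max_key_list) []

-- ===== PORT B =====

-- Source B's inner 'occurrences(p)': scatter each pattern character's text positions onto
-- the alignments they support, then count alignments with enough matches
def pvOccurrences (pos : PySem.Dict Char (List Int)) (n : Int) (mismatches : Int) (p : String) : Int :=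
  let L := PySem.Str.len p
  let acc : PySem.Dict Int Int :=
    (PySem.List.enumerate p.toList 0).foldl
      (fun acc ic =>
        (pos.getD ic.2 []).foldl
          (fun acc t => acc.insert (t - ic.1) (acc.getD (t - ic.1) 0 + 1)) acc)
      PySem.Dict.empty
  -- sum(1 for j in range(n - L + 1) if L - acc.get(j, 0) <= mismatches)
  (((PySem.List.pyRange 0 (n - L + 1) 1).countP
      (fun j => decide (L - acc.getD j 0 ≤ mismatches)) : Nat) : Int)

def approx_pattern_alt (genome : String) (pattern_len : Int) (mismatches : Int) : List String :=
  let n : Int := PySem.Str.len genome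
  -- pos[c] = pos.get(c, []) + [t] over enumerate(genome)
  let pos : PySem.Dict Char (List Int) :=
    (PySem.List.enumerate genome.toList 0).foldl
      (fun d tc => d.modify tc.2 [] (fun l => l ++ [tc.1])) PySem.Dict.empty
  let counts : PySem.Dict String Int :=
    (PySem.List.pyRange 0 (n - pattern_len - 1) 1).foldl
      (fun d i =>
        let seq := String.ofList (PySem.List.slice genome.toList (some i) (some (i + pattern_len)))
        if d.contains seq then d
        else d.insert seq
          (pvOccurrences pos n mismatches seq +
           pvOccurrences pos n mismatches (reverse_complement seq)))
      PySem.Dict.empty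
  match PySem.List.max? counts.values (fun v => v) with
  | none => []   -- Python: max() on an empty sequence raises ValueError (outside Pre_)
  | some best => (counts.items.filter (fun kv => kv.2 == best)).map (fun kv => kv.1)

-- ===== PRECONDITION & SPEC =====
-- Pre_ is exactly where A returns: the candidate dict is nonempty (pattern_len + 2 <= len(genome));
-- otherwise A's max() raises ValueError.
def Pre_approx_pattern (genome : String) (pattern_len : Int) (mismatches : Int) : Prop :=
  pattern_len + 2 ≤ (genome.toList.length : Int)
instance (genome : String) (pattern_len : Int) (mismatches : Int) : Decidable (Pre_approx_pattern genome pattern_len mismatches) := by unfold Pre_approx_pattern; infer_instance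

def pvWitness_approx_pattern : String × Int × Int := ("ACGTA", 2, 1)

def Spec_approx_pattern (genome : String) (pattern_len : Int) (mismatches : Int) (out : List String) : Prop := out = approx_pattern_alt genome pattern_len mismatches
instance (genome : String) (pattern_len : Int) (mismatches : Int) (out : List String) : Decidable (Spec_approx_pattern genome pattern_len mismatches out) := by unfold Spec_approx_pattern; infer_instance

-- ===== CLAIM (what is proved, stated in full; the proofs are below) =====
def Claim_equal_approx_pattern : Prop := ∀ (genome : String) (pattern_len : Int) (mismatches : Int), Dom_approx_pattern genome pattern_len mismatches → Pre_approx_pattern genome pattern_len mismatches → Spec_approx_pattern genome pattern_len mismatches (approx_pattern genome pattern_len mismatches)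

-- ===== LEMMAS AND PROOFS =====

-- hamming count between a window and a pattern (the quantity both ports compute)
def pvHam (g p : List Char) : Nat := (g.zip p).countP (fun xy => xy.1 != xy.2)

-- whether the window at offset t approx-matches p
def pvCond (G p : List Char) (m : Int) (t : Nat) : Bool := decide ((pvHam (G.drop t) p : Int) ≤ m)

lemma pvWhileCount_eq (g p : List Char) (h : p.length ≤ g.length) :
    ∀ j count, pvWhileCount g p j count = count + ((g.drop j).zip (p.drop j)).countP (fun xy => xy.1 != xy.2) := by
  intro j count
  fun_induction pvWhileCount g p j count with
  | case1 j count hlt ih =>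
    rw [dite_eq_ite] at ih
    rw [ih]
    have hg : j < g.length := lt_of_lt_of_le hlt h
    rw [List.drop_eq_getElem_cons hg, List.drop_eq_getElem_cons hlt]
    simp only [List.zip_cons_cons, List.countP_cons]
    have : PySem.List.pyGetD g (j : Int) '?' = g[j] := by
      rw [PySem.List.pyGetD_natCast, List.getD_eq_getElem g '?' hg]
    rw [this]
    have : PySem.List.pyGetD p (j : Int) '?' = p[j] := by
      rw [PySem.List.pyGetD_natCast, List.getD_eq_getElem p '?' hlt]
    rw [this]
    by_cases hc : g[j] = p[j] <;> simp [hc] <;> omega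
  | case2 j count hge =>
    have : p.drop j = [] := List.drop_eq_nil_of_le (by omega)
    simp [this]

lemma pvWhileCount_ham (g p : List Char) (h : p.length ≤ g.length) :
    pvWhileCount g p 0 0 = pvHam g p := by
  simpa [pvHam] using pvWhileCount_eq g p h 0 0

lemma pm_fold (G P : List Char) (m : Int) :
    ∀ (c t : Nat) (a : Int) (acc : List Int),
      t + c + P.length ≤ G.length + 1 →
      (((PySem.List.pyRange a (a + (c : Int)) 1).foldl
        (fun (st : List Char × List Int) i =>
          let count := pvWhileCount st.1 P 0 0
          let pattern_index := if (count : Int) ≤ m then st.2 ++ [i] else st.2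
          (PySem.List.slice st.1 (some 1) none, pattern_index))
        (G.drop t, acc)).2).length
      = acc.length + (List.range c).countP (fun j => pvCond G P m (t + j)) := by
  intro c
  induction c with
  | zero =>
    intro t a acc h
    rw [show ((0:Nat):Int) = 0 from rfl, add_zero, PySem.List.pyRange_one_eq_nil (le_refl a)]
    simp
  | succ c ih =>
    intro t a acc h
    have hlt : a < a + ((c+1 : Nat) : Int) := by push_cast; omega
    rw [PySem.List.pyRange_one_cons hlt, List.foldl_cons]
    have hplen : P.length ≤ (G.drop t).length := by
      rw [List.length_drop]; omega
    dsimp only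
    rw [pvWhileCount_ham _ _ hplen, PySem.List.slice_from_one, List.tail_drop]
    have hbound : a + ((c+1:Nat) : Int) = (a + 1) + (c : Int) := by push_cast; ring
    rw [hbound, ih (t+1) (a+1) _ (by omega)]
    have hshift : (List.range c).countP (fun j => pvCond G P m (t+1+j))
        = (List.range c).countP (fun j => pvCond G P m (t+(j+1))) := by
      apply List.countP_congr
      intro j _
      have harith : t+1+j = t+(j+1) := by omega
      rw [harith]
    have hsucc : (List.range (c+1)).countP (fun j => pvCond G P m (t + j))
        = (if pvCond G P m t then 1 else 0) + (List.range c).countP (fun j => pvCond G P m (t+(j+1))) := by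
      rw [List.range_succ_eq_map, List.countP_cons, List.countP_map]
      have hcomp : ((fun j => pvCond G P m (t + j)) ∘ Nat.succ) = (fun j => pvCond G P m (t+(j+1))) := by
        funext j
        simp only [Function.comp, Nat.succ_eq_add_one]
      rw [hcomp]
      simp only [add_zero]
      by_cases h0 : pvCond G P m t = true <;> simp [h0] <;> omega
    rw [hshift, hsucc]
    by_cases hcnd : ((pvHam (G.drop t) P : Nat) : Int) ≤ m
    · have h0 : pvCond G P m t = true := by
        simp only [pvCond, decide_eq_true_eq]
        exact hcnd
      rw [if_pos hcnd, h0]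
      simp
      try omega
    · have h0 : pvCond G P m t = false := by
        simp only [pvCond, decide_eq_false_iff_not]
        exact hcnd
      rw [if_neg hcnd, h0]
      simp
      try omega

lemma pattern_mismatch_eq (genome p : String) (m : Int)
    (h2 : p.toList.length ≤ genome.toList.length) :
    pattern_mismatch genome p m
      = (((List.range (genome.toList.length - p.toList.length + 1)).countP
          (fun j => pvCond genome.toList p.toList m j) : Nat) : Int) := by
  unfold pattern_mismatch
  have hb : PySem.Str.len genome - (PySem.Str.len p - 1)
      = (0:Int) + ((genome.toList.length - p.toList.length + 1 : Nat) : Int) := by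
    simp only [PySem.Str.len_eq]
    push_cast [Nat.sub_add_cancel, h2]
    omega
  rw [hb]
  have hfold := pm_fold genome.toList p.toList m (genome.toList.length - p.toList.length + 1) 0 0 []
    (by omega)
  simp only [List.drop_zero] at hfold
  dsimp only
  rw [hfold]
  simp


-- dict built by "if seq not in d: d[seq] = v(seq)" over xs
lemma pvItemsFold (v : String → Int) (xs : List String) :
    ((xs.foldl (fun d s => if d.contains s then d else d.insert s (v s))
        (PySem.Dict.empty : PySem.Dict String Int))).items
      = (PySem.Set.ofList xs).map (fun s => (s, v s)) := by
  induction xs using List.reverseRecOn with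
  | nil => rfl
  | append_singleton xs x ih =>
    rw [List.foldl_append, List.foldl_cons, List.foldl_nil]
    set d := xs.foldl (fun d s => if d.contains s then d else d.insert s (v s))
      (PySem.Dict.empty : PySem.Dict String Int) with hd
    have hkeys : d.keys = PySem.Set.ofList xs := by
      simp only [PySem.Dict.keys, ih, List.map_map]
      exact List.map_id _
    by_cases hx : x ∈ PySem.Set.ofList xs
    · have hc : d.contains x = true := by
        rw [PySem.Dict.contains_eq_decide_mem_keys, hkeys]; simp [hx]
      rw [if_pos hc, ih, PySem.Set.ofList_append_singleton, PySem.Set.add_of_mem hx]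
    · have hc : d.contains x = false := by
        rw [PySem.Dict.contains_eq_decide_mem_keys, hkeys]; simp [hx]
      rw [if_neg (by simp [hc]), PySem.Dict.items_insert_of_not_contains d _ hc, ih,
          PySem.Set.ofList_append_singleton, PySem.Set.add_of_not_mem hx, List.map_append]
      simp

lemma pvItemsFold' {α : Type} (v : String → Int) (win : α → String) (l : List α) :
    (l.foldl (fun (d : PySem.Dict String Int) (j : α) =>
        if d.contains (win j) then d else d.insert (win j) (v (win j))) PySem.Dict.empty).items
      = (PySem.Set.ofList (l.map win)).map (fun s => (s, v s)) := by
  have h := pvItemsFold v (l.map win)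
  rw [List.foldl_map] at h
  exact h

lemma pvKeys_of_items (d : PySem.Dict String Int) (v : String → Int) (S : List String)
    (hitems : d.items = S.map (fun s => (s, v s))) : d.keys = S := by
  simp only [PySem.Dict.keys, hitems, List.map_map]
  exact List.map_id _

lemma pvValues_of_items (d : PySem.Dict String Int) (v : String → Int) (S : List String)
    (hitems : d.items = S.map (fun s => (s, v s))) : d.values = S.map v := by
  simp only [PySem.Dict.values, hitems, List.map_map]
  rfl

def pvMaxStep {α κ : Type} [LT κ] [DecidableLT κ] (key : α → κ) (acc : Option α) (x : α) : Option α :=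
  match acc with
  | none => some x
  | some mm => if key mm < key x then some x else some mm

lemma pvMax?_eq {α κ : Type} [LT κ] [DecidableLT κ] (l : List α) (key : α → κ) :
    PySem.List.max? l key = l.foldl (pvMaxStep key) none := by
  unfold PySem.List.max?
  congr 1

lemma pvMax?_mem {α κ : Type} [LT κ] [DecidableLT κ] (l : List α) (key : α → κ) (m : α)
    (h : PySem.List.max? l key = some m) : m ∈ l := by
  rw [pvMax?_eq] at h
  have aux : ∀ (l : List α) (acc : Option α),
      l.foldl (pvMaxStep key) acc = some m → acc = some m ∨ m ∈ l := by
    intro l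
    induction l with
    | nil => intro acc hacc; exact Or.inl hacc
    | cons x t ih =>
      intro acc hacc
      rcases ih _ hacc with hcase | hmem
      · cases acc with
        | none =>
          simp [pvMaxStep] at hcase
          exact Or.inr (by simp [hcase])
        | some m0 =>
          simp only [pvMaxStep] at hcase
          split at hcase
          · simp at hcase; exact Or.inr (by simp [hcase])
          · exact Or.inl hcase
      · exact Or.inr (List.mem_cons_of_mem _ hmem)
  rcases aux l none h with hc | hm
  · simp at hc
  · exact hm

lemma pvMax?_congr {α κ : Type} [LT κ] [DecidableLT κ] (l : List α) (f g : α → κ)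
    (h : ∀ x ∈ l, f x = g x) : PySem.List.max? l f = PySem.List.max? l g := by
  rw [pvMax?_eq, pvMax?_eq]
  have aux : ∀ (l : List α) (acc : Option α),
      (∀ x, acc = some x → f x = g x) → (∀ x ∈ l, f x = g x) →
      l.foldl (pvMaxStep f) acc = l.foldl (pvMaxStep g) acc := by
    intro l
    induction l with
    | nil => intro acc _ _; rfl
    | cons x t ih =>
      intro acc hacc hl
      have hx : f x = g x := hl x List.mem_cons_self
      have hl' : ∀ y ∈ t, f y = g y := fun y hy => hl y (List.mem_cons_of_mem _ hy)
      have hstep : pvMaxStep f acc x = pvMaxStep g acc x := by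
        cases acc with
        | none => rfl
        | some m0 => simp [pvMaxStep, hacc m0 rfl, hx]
      simp only [List.foldl_cons, hstep]
      refine ih (pvMaxStep g acc x) ?_ hl'
      intro y hy
      cases acc with
      | none => simp [pvMaxStep] at hy; subst hy; exact hx
      | some m0 =>
        simp only [pvMaxStep] at hy
        split at hy
        · simp at hy; subst hy; exact hx
        · simp at hy; subst hy; exact hacc m0 rfl
  exact aux l none (by intro x hx; cases hx) h

lemma pvMax?_map_id {α : Type} (l : List α) (v : α → Int) :
    PySem.List.max? (l.map v) (fun x => x) = (PySem.List.max? l v).map v := by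
  rw [pvMax?_eq, pvMax?_eq]
  have aux : ∀ (l : List α) (acc : Option α),
      (l.map v).foldl (pvMaxStep (fun x => x)) (acc.map v)
        = (l.foldl (pvMaxStep v) acc).map v := by
    intro l
    induction l with
    | nil => intro acc; rfl
    | cons x t ih =>
      intro acc
      have hstep : pvMaxStep (fun x => x) (acc.map v) (v x) = (pvMaxStep v acc x).map v := by
        cases acc with
        | none => rfl
        | some m0 => simp [pvMaxStep]; split <;> rfl
      simp only [List.map_cons, List.foldl_cons, hstep]
      exact ih (pvMaxStep v acc x)
  simpa using aux l none

lemma pvMax?_isSome {α κ : Type} [LT κ] [DecidableLT κ] (l : List α) (key : α → κ) (h : l ≠ []) :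
    (PySem.List.max? l key).isSome := by
  rw [pvMax?_eq]
  have aux : ∀ (l : List α) (x : α), (l.foldl (pvMaxStep key) (some x)).isSome := by
    intro l
    induction l with
    | nil => intro x; rfl
    | cons y t ih =>
      intro x
      simp only [List.foldl_cons, pvMaxStep]
      split
      · exact ih y
      · exact ih x
  cases l with
  | nil => exact absurd rfl h
  | cons x t => exact aux t x

-- shared tail of both ports: pick the maximal count, collect all keys attaining it
lemma pvTail (d : PySem.Dict String Int) (v : String → Int) (S : List String)
    (hitems : d.items = S.map (fun s => (s, v s))) (hnd : S.Nodup) (hne : S ≠ []) :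
    (match PySem.List.max? d.keys (fun key => d.getD key 0) with
     | none => ([] : List String)
     | some max_key =>
         d.items.foldl (fun (max_key_list : List String) (kv : String × Int) =>
           if kv.2 = d.getD max_key 0 then max_key_list ++ [kv.1] else max_key_list) [])
    = (match PySem.List.max? d.values (fun v => v) with
       | none => ([] : List String)
       | some best => (d.items.filter (fun kv : String × Int => kv.2 == best)).map (fun kv : String × Int => kv.1)) := by
  have hkeys := pvKeys_of_items d v S hitems
  have hvals := pvValues_of_items d v S hitems
  have hgetD : ∀ s ∈ S, d.getD s 0 = v s := by
    intro s hs
    exact PySem.Dict.getD_of_mem_items _ (by rw [hitems]; exact List.mem_map_of_mem hs)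
      (by rw [hkeys]; exact hnd) 0
  rw [hkeys, hvals]
  rw [pvMax?_congr S (fun key => d.getD key 0) v hgetD]
  rw [pvMax?_map_id]
  cases hmx : PySem.List.max? S v with
  | none =>
    exfalso
    have hsome := pvMax?_isSome S v hne
    rw [hmx] at hsome
    simp at hsome
  | some mk =>
    simp only [Option.map_some]
    have hmkS : mk ∈ S := pvMax?_mem S v mk hmx
    rw [hgetD mk hmkS]
    rw [PySem.List.foldl_append_ite (p := fun kv : String × Int => kv.2 = v mk)
      (f := fun kv : String × Int => kv.1)]
    rw [List.nil_append]
    congr 1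



-- pattern longer than the genome: A finds no windows at all
lemma pattern_mismatch_long (genome p : String) (m : Int)
    (h : (genome.toList.length : Int) < (p.toList.length : Int)) :
    pattern_mismatch genome p m = 0 := by
  unfold pattern_mismatch
  rw [PySem.List.pyRange_one_eq_nil (by simp only [PySem.Str.len_eq]; omega)]
  simp

-- generic counter built by nested 'd[key] = d.get(key, 0) + 1' loops
lemma pvNestedCount {α κ : Type} [BEq κ] [LawfulBEq κ] (nbs : α → List κ) (l : List α) (x : κ) :
    ∀ d : PySem.Dict κ Int,
      (l.foldl (fun d a => (nbs a).foldl (fun d k => d.insert k (d.getD k 0 + 1)) d) d).getD x 0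
        = d.getD x 0 + ((l.flatMap nbs).count x : Int) := by
  induction l with
  | nil => intro d; simp
  | cons j t ih =>
    intro d
    rw [List.foldl_cons, ih, PySem.Dict.getD_foldl_insert_add_one]
    simp [List.count_append]
    ring

-- the inverted index read at c is the list of positions of c in G (in order)
lemma pvPos_getD (G : List Char) (c : Char) :
    ((PySem.List.enumerate G 0).foldl
        (fun (d : PySem.Dict Char (List Int)) tc => d.modify tc.2 [] (fun l => l ++ [tc.1]))
        PySem.Dict.empty).getD c []
      = ((PySem.List.enumerate G 0).filter (fun tc => tc.2 == c)).map (fun tc => tc.1) := by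
  have hfun : ((PySem.List.enumerate G 0).foldl
        (fun (d : PySem.Dict Char (List Int)) tc => d.modify tc.2 [] (fun l => l ++ [tc.1]))
        PySem.Dict.empty)
      = (((PySem.List.enumerate G 0).map Prod.swap).foldl
        (fun (d : PySem.Dict Char (List Int)) p => d.modify p.1 [] (fun l => l ++ [p.2]))
        PySem.Dict.empty) := by
    rw [List.foldl_map]
    rfl
  rw [hfun, PySem.Dict.getD_foldl_modify_append]
  rw [List.filter_map, List.map_map]
  simp [Function.comp_def, Prod.fst_swap, Prod.snd_swap]

-- count of an alignment key in the shifted position list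
lemma pvPosCount (G : List Char) (c : Char) (x : Int)
    (h0 : 0 ≤ x) (hN : x < (G.length : Int)) :
    (((PySem.List.enumerate G 0).filter (fun tc => tc.2 == c)).map (fun tc => tc.1)).count x
      = if G[x.toNat]'(by omega) = c then 1 else 0 := by
  have hnd : ((((PySem.List.enumerate G 0).filter (fun tc => tc.2 == c)).map (fun tc => tc.1))).Nodup := by
    have hpw := PySem.List.pairwise_lt_enumerate G 0
    have hpf : (((PySem.List.enumerate G 0).filter (fun tc => tc.2 == c))).Pairwise (fun p q => p.1 < q.1) :=
      hpw.filter _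
    have : ((((PySem.List.enumerate G 0).filter (fun tc => tc.2 == c)).map (fun tc => tc.1))).Pairwise (· < ·) :=
      List.pairwise_map.mpr hpf
    exact this.imp (fun h => ne_of_lt h)
  rw [List.Nodup.count hnd]
  have hmem : x ∈ (((PySem.List.enumerate G 0).filter (fun tc => tc.2 == c)).map (fun tc => tc.1))
      ↔ G[x.toNat]'(by omega) = c := by
    constructor
    · intro hx
      rcases List.mem_map.mp hx with ⟨tc, htc, rfl⟩
      rcases List.mem_filter.mp htc with ⟨he, hc2⟩
      rcases (PySem.List.mem_enumerate_iff _ _ _).mp he with ⟨k, hk, rfl⟩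
      simp only [zero_add] at *
      simp only [show ((k : Nat) : Int).toNat = k from by omega]
      exact (beq_iff_eq.mp hc2)
    · intro hx
      refine List.mem_map.mpr ⟨(x, G[x.toNat]'(by omega)), ?_, rfl⟩
      refine List.mem_filter.mpr ⟨?_, by simp [hx]⟩
      refine (PySem.List.mem_enumerate_iff _ _ _).mpr ⟨x.toNat, by omega, ?_⟩
      simp only [zero_add]
      congr 1
      omega
  by_cases h : G[x.toNat]'(by omega) = c
  · rw [if_pos h, if_pos (hmem.mpr h)]
  · rw [if_neg h, if_neg (fun hm => h (hmem.mp hm))]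

lemma pvCountShift (l : List Int) (j i : Int) :
    (l.map (fun t => t - i)).count j = l.count (j + i) := by
  rw [List.count_eq_countP, List.countP_map, List.count_eq_countP]
  apply List.countP_congr
  intro t _
  simp only [Function.comp]
  constructor
  · intro h
    have := beq_iff_eq.mp h
    exact beq_iff_eq.mpr (by omega)
  · intro h
    have := beq_iff_eq.mp h
    exact beq_iff_eq.mpr (by omega)

-- scattering the pattern characters' position lists counts the matches of the window at j
lemma pvAccSum (G P : List Char) (j : Int) :
    ∀ s : Int, 0 ≤ j + s → (j + s).toNat + P.length ≤ G.length →
    ((PySem.List.enumerate P s).map (fun ic =>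
        ((((PySem.List.enumerate G 0).filter (fun tc => tc.2 == ic.2)).map (fun tc => tc.1)).map
          (fun t => t - ic.1)).count j)).sum
      = ((G.drop (j + s).toNat).zip P).countP (fun xy => xy.1 == xy.2) := by
  induction P with
  | nil => intro s _ _; simp [PySem.List.enumerate_nil]
  | cons c P' ih =>
    intro s h0 hlen
    rw [PySem.List.enumerate_cons, List.map_cons, List.sum_cons]
    rw [pvCountShift]
    have hjs : ((j + s).toNat : Int) = j + s := by omega
    have hlt : (j + s).toNat < G.length := by
      simp only [List.length_cons] at hlen
      omega
    rw [pvPosCount G c (j + s) h0 (by omega)]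
    rw [List.drop_eq_getElem_cons hlt, List.zip_cons_cons, List.countP_cons]
    have hnext : (j + (s + 1)).toNat = (j + s).toNat + 1 := by omega
    have htail := ih (s + 1) (by omega) (by simp only [List.length_cons] at hlen; omega)
    rw [hnext] at htail
    rw [htail]
    by_cases h : G[(j + s).toNat] = c
    · rw [if_pos h, if_pos (by simpa using h)]
      omega
    · rw [if_neg h, if_neg (by simpa using h)]
      omega

-- zip pairs split into matches and mismatches
lemma pvMatchHam (g p : List Char) (h : p.length ≤ g.length) :
    (g.zip p).countP (fun xy => xy.1 == xy.2) + pvHam g p = p.length := by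
  unfold pvHam
  have hlen : (g.zip p).length = p.length := by
    rw [List.length_zip]
    omega
  have := List.length_eq_countP_add_countP (fun xy : Char × Char => xy.1 == xy.2) (l := g.zip p)
  rw [hlen] at this
  rw [this]
  congr 1
  apply List.countP_congr
  intro xy _
  simp [bne]

-- A's rescanning count equals B's inverted-index count, for EVERY pattern string
lemma pvPM_eq_occ (genome p : String) (m : Int) :
    pattern_mismatch genome p m
      = pvOccurrences
          ((PySem.List.enumerate genome.toList 0).foldl
            (fun (d : PySem.Dict Char (List Int)) tc => d.modify tc.2 [] (fun l => l ++ [tc.1]))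
            PySem.Dict.empty)
          (PySem.Str.len genome) m p := by
  unfold pvOccurrences
  dsimp only
  by_cases hLN : p.toList.length ≤ genome.toList.length
  · rw [pattern_mismatch_eq genome p m hLN]
    have hb : PySem.Str.len genome - PySem.Str.len p + 1
        = ((genome.toList.length - p.toList.length + 1 : Nat) : Int) := by
      simp only [PySem.Str.len_eq]
      omega
    rw [hb, PySem.List.pyRange_zero_nat]
    rw [List.countP_map]
    congr 1
    apply List.countP_congr
    intro j hj
    have hjd : j < genome.toList.length - p.toList.length + 1 := List.mem_range.mp hj
    simp only [Function.comp]
    -- the inner foldl is a counter over the shifted position lists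
    have hfun2 : (fun (acc : PySem.Dict Int Int) (ic : Int × Char) =>
        List.foldl (fun acc t => acc.insert (t - ic.1) (acc.getD (t - ic.1) 0 + 1)) acc
          ((List.foldl (fun (d : PySem.Dict Char (List Int)) tc => d.modify tc.2 [] fun l => l ++ [tc.1]) PySem.Dict.empty
              (PySem.List.enumerate genome.toList)).getD ic.2 []))
        = (fun (acc : PySem.Dict Int Int) (ic : Int × Char) =>
            ((((PySem.List.enumerate genome.toList 0).filter (fun tc => tc.2 == ic.2)).map (fun tc => tc.1)).map
              (fun t => t - ic.1)).foldl (fun acc k => acc.insert k (acc.getD k 0 + 1)) acc) := by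
      funext acc ic
      rw [List.foldl_map, pvPos_getD]
    rw [hfun2, pvNestedCount]
    have hacc : ((PySem.List.enumerate p.toList 0).flatMap (fun ic =>
        (((PySem.List.enumerate genome.toList 0).filter (fun tc => tc.2 == ic.2)).map (fun tc => tc.1)).map
          (fun t => t - ic.1))).count (j : Int)
        = ((genome.toList.drop j).zip p.toList).countP (fun xy => xy.1 == xy.2) := by
      rw [List.count_eq_countP, List.countP_flatMap]
      have hmapf : ((List.countP (fun x => x == (j : Int))) ∘ fun ic : Int × Char =>
          (((PySem.List.enumerate genome.toList 0).filter (fun tc => tc.2 == ic.2)).map (fun tc => tc.1)).map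
            (fun t => t - ic.1))
          = fun ic : Int × Char =>
            ((((PySem.List.enumerate genome.toList 0).filter (fun tc => tc.2 == ic.2)).map (fun tc => tc.1)).map
              (fun t => t - ic.1)).count (j : Int) := by
        funext ic
        rw [List.count_eq_countP]
        rfl
      rw [hmapf]
      have := pvAccSum genome.toList p.toList (j : Int) 0 (by omega)
        (by
          have : ((j : Int) + 0).toNat = j := by omega
          rw [this]
          omega)
      simp only [add_zero] at this
      rw [this, Int.toNat_natCast]
    have hempty : (PySem.Dict.empty : PySem.Dict Int Int).getD (j : Int) 0 = 0 := rfl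
    rw [hempty, zero_add, hacc]
    have hham := pvMatchHam (genome.toList.drop j) p.toList (by rw [List.length_drop]; omega)
    unfold pvCond
    rw [PySem.Str.len_eq]
    have hcast : ((genome.toList.drop j).zip p.toList).countP (fun xy => xy.1 == xy.2)
        = p.toList.length - pvHam (genome.toList.drop j) p.toList := by omega
    rw [hcast]
    have hhle : pvHam (genome.toList.drop j) p.toList ≤ p.toList.length := by omega
    simp only [decide_eq_true_eq]
    constructor
    · intro h
      push_cast [Nat.cast_sub hhle]
      omega
    · intro h
      push_cast [Nat.cast_sub hhle] at h
      omega
  · rw [pattern_mismatch_long genome p m (by omega)]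
    rw [PySem.List.pyRange_one_eq_nil (by simp only [PySem.Str.len_eq]; omega)]
    simp

-- ===== VERDICT (by name: the statement is the Claim_ definition above) =====
theorem approx_pattern_spec : Claim_equal_approx_pattern := by
  unfold Claim_equal_approx_pattern
  intro genome k m _ hpre
  unfold Spec_approx_pattern
  unfold Pre_approx_pattern at hpre
  unfold approx_pattern approx_pattern_alt
  dsimp only
  have hfun : (fun (x : PySem.Dict String Int) (y : Int) =>
      if x.contains (String.ofList (PySem.List.slice genome.toList (some y) (some (k + y)))) = true then x
      else
        x.insert (String.ofList (PySem.List.slice genome.toList (some y) (some (k + y))))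
          (pattern_mismatch genome (String.ofList (PySem.List.slice genome.toList (some y) (some (k + y)))) m +
            pattern_mismatch genome (reverse_complement (String.ofList (PySem.List.slice genome.toList (some y) (some (k + y))))) m))
      = (fun (x : PySem.Dict String Int) (y : Int) =>
      if x.contains (String.ofList (PySem.List.slice genome.toList (some y) (some (y + k)))) = true then x
      else
        x.insert (String.ofList (PySem.List.slice genome.toList (some y) (some (y + k))))
          (pvOccurrences ((PySem.List.enumerate genome.toList 0).foldl
            (fun (d : PySem.Dict Char (List Int)) tc => d.modify tc.2 [] (fun l => l ++ [tc.1]))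
            PySem.Dict.empty) (PySem.Str.len genome) m (String.ofList (PySem.List.slice genome.toList (some y) (some (y + k)))) +
            pvOccurrences ((PySem.List.enumerate genome.toList 0).foldl
            (fun (d : PySem.Dict Char (List Int)) tc => d.modify tc.2 [] (fun l => l ++ [tc.1]))
            PySem.Dict.empty) (PySem.Str.len genome) m (reverse_complement (String.ofList (PySem.List.slice genome.toList (some y) (some (y + k))))))) := by
    funext x y
    rw [Int.add_comm k y]
    rw [pvPM_eq_occ genome _ m, pvPM_eq_occ genome _ m]
  rw [hfun]
  have hitems := pvItemsFold'
    (fun s : String =>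
      pvOccurrences ((PySem.List.enumerate genome.toList 0).foldl
            (fun (d : PySem.Dict Char (List Int)) tc => d.modify tc.2 [] (fun l => l ++ [tc.1]))
            PySem.Dict.empty) (PySem.Str.len genome) m s +
      pvOccurrences ((PySem.List.enumerate genome.toList 0).foldl
            (fun (d : PySem.Dict Char (List Int)) tc => d.modify tc.2 [] (fun l => l ++ [tc.1]))
            PySem.Dict.empty) (PySem.Str.len genome) m (reverse_complement s))
    (fun i : Int => String.ofList (PySem.List.slice genome.toList (some i) (some (i + k))))
    (PySem.List.pyRange 0 (PySem.Str.len genome - k - 1) 1)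
  have hSne : ((PySem.Set.ofList ((PySem.List.pyRange 0 (PySem.Str.len genome - k - 1) 1).map
      (fun i : Int => String.ofList (PySem.List.slice genome.toList (some i) (some (i + k)))))) : List String) ≠ [] := by
    apply List.ne_nil_of_mem
    have h0 : (0 : Int) ∈ PySem.List.pyRange 0 (PySem.Str.len genome - k - 1) 1 := by
      refine PySem.List.mem_pyRange_one.mpr ?_
      rw [PySem.Str.len_eq]
      omega
    exact (PySem.Set.mem_ofList _ _).mpr (List.mem_map_of_mem h0)
  exact pvTail _ _ _ hitems (PySem.Set.nodup_ofList _) hSne
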